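-- pv_equiv track=rewrite | github.com/Gregory1994/LeetCode | 401.二进制手表.py | Minutes
-- ===== SOURCE A (Python) =====
-- def Minutes(minutes):
--     res = []
--     for i in range(60):
--         m = i
--         n = 0
--         while m != 0:
--             n += m & 1
--             m >>= 1
--         if n == minutes:
--             if i < 10:
--                 res.append('0' + str(i))
--             else:
--                 res.append(str(i))
--     return res
-- ===== SOURCE B (Python) =====
-- def Minutes(minutes):
--     # Enumerate which of the 6 minute-LED bits are lit instead of testing all 60 values.
--     if minutes < 0:
--         return []
--     def combos(xs, k):
--         if k == 0:
--             return [[]]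
--         if not xs:
--             return []
--         x, rest = xs[0], xs[1:]
--         return [[x] + c for c in combos(rest, k - 1)] + combos(rest, k)
--     vals = [sum(1 << p for p in c) for c in combos(list(range(6)), minutes)]
--     return [str(v).zfill(2) for v in sorted(vals) if v < 60]
-- ===== Notes on version B (the rewrite author's own statement) =====
-- stated objective: alternative
-- what changed: Instead of scanning every candidate minute value and counting the set bits of each, B enumerates the combinations of lit LED bit positions, sums their powers of two, sorts, filters out overflowing values and zero-pads.
import Mathlib
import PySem

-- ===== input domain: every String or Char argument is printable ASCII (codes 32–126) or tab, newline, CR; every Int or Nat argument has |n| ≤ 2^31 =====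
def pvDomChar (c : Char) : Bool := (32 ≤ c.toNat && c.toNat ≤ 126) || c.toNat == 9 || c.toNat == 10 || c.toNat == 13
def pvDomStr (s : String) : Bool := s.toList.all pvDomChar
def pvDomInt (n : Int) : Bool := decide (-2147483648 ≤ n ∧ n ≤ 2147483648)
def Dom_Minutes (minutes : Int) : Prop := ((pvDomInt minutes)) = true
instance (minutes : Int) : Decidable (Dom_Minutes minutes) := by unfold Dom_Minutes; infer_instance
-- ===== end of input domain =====

-- B enumerates lit LED/bit combinations instead of popcount-testing all 60 values (objective: alternative).

-- ===== PORT A =====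
-- the 'while m != 0' loop; fuel m.toNat suffices for m ≥ 0 (Python diverges for m < 0, never reached:
-- m starts at i ∈ [0,60)); structural recursion so the kernel can evaluate it
def pvPcGo : Nat → Int → Int → Int
  | 0, _, n => n
  | f + 1, m, n =>
    if m = 0 then n else pvPcGo f (PySem.Int.floordiv m 2) (n + PySem.Int.mod m 2)

def pvPc (m n : Int) : Int := pvPcGo m.toNat m n

def Minutes (minutes : Int) : List String :=
  (PySem.List.pyRange 0 60 1).foldl
    (fun res i =>
      let n := pvPc i 0
      if n = minutes then
        res ++ [if i < 10 then "0" ++ PySem.Int.toStr i else PySem.Int.toStr i]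
      else res) []

-- ===== PORT B =====
def pvCombos (xs : List Int) (k : Nat) : List (List Int) :=
  match k, xs with
  | 0, _ => [[]]
  | _ + 1, [] => []
  | k + 1, x :: rest => (pvCombos rest k).map (fun c => x :: c) ++ pvCombos rest (k + 1)

-- str(v).zfill(2); exact for v ≥ 0 (all values here are ≥ 0)
def pvZfill2 (v : Int) : String :=
  let s := PySem.Int.toStr v
  if s.toList.length < 2 then "0" ++ s else s

def Minutes_alt (minutes : Int) : List String :=
  if minutes < 0 then []
  else
    let vals := (pvCombos (PySem.List.pyRange 0 6 1) minutes.toNat).map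
      (fun c => c.foldl (fun s p => s + 2 ^ p.toNat) 0)
    ((PySem.List.sorted vals (fun v => v) false).filter (fun v => decide (v < 60))).map pvZfill2

-- ===== PRECONDITION & SPEC =====
def Spec_Minutes (minutes : Int) (out : List String) : Prop := out = Minutes_alt minutes
instance (minutes : Int) (out : List String) : Decidable (Spec_Minutes minutes out) := by unfold Spec_Minutes; infer_instance

-- ===== CLAIM (what is proved, stated in full; the proofs are below) =====
def Claim_equal_Minutes : Prop := ∀ (minutes : Int), Dom_Minutes minutes → Spec_Minutes minutes (Minutes minutes)

-- ===== LEMMAS AND PROOFS =====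

-- A's fold appends exactly the formatted i with popcount = minutes
theorem pvA_foldl_char (minutes : Int) (l : List Int) (acc : List String) :
    l.foldl
      (fun res i =>
        let n := pvPc i 0
        if n = minutes then
          res ++ [if i < 10 then "0" ++ PySem.Int.toStr i else PySem.Int.toStr i]
        else res) acc
    = acc ++ l.filterMap
        (fun i => if pvPc i 0 = minutes then
            some (if i < 10 then "0" ++ PySem.Int.toStr i else PySem.Int.toStr i)
          else none) := by
  induction l generalizing acc with
  | nil => simp
  | cons x xs ih =>
    simp only [List.foldl_cons, List.filterMap_cons]
    by_cases h : pvPc x 0 = minutes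
    · simp [h, ih]
    · simp [h, ih]

theorem pvPc_bounds : ∀ i ∈ PySem.List.pyRange 0 60 1, 0 ≤ pvPc i 0 ∧ pvPc i 0 ≤ 5 := by
  decide

theorem pvCombos_eq_nil (xs : List Int) (k : Nat) (h : xs.length < k) : pvCombos xs k = [] := by
  induction xs generalizing k with
  | nil => cases k with
    | zero => omega
    | succ k => rfl
  | cons x rest ih =>
    cases k with
    | zero => omega
    | succ k =>
      simp only [pvCombos]
      have h1 : rest.length < k := by simpa using h
      have h2 : rest.length < k + 1 := by omega
      rw [ih k h1, ih (k + 1) h2]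
      rfl

theorem pvA_out_of_range (minutes : Int) (h : minutes < 0 ∨ 6 < minutes) : Minutes minutes = [] := by
  unfold Minutes
  rw [pvA_foldl_char]
  simp only [List.nil_append, List.filterMap_eq_nil_iff]
  intro i hi
  have := pvPc_bounds i hi
  have : pvPc i 0 ≠ minutes := by omega
  simp [this]

theorem pvB_out_of_range (minutes : Int) (h : minutes < 0 ∨ 6 < minutes) : Minutes_alt minutes = [] := by
  unfold Minutes_alt
  rcases h with h | h
  · simp [h]
  · have hneg : ¬ minutes < 0 := by omega
    have hlen : (PySem.List.pyRange 0 6 1).length < minutes.toNat := by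
      simp [show PySem.List.pyRange 0 6 1 = [0,1,2,3,4,5] from rfl]
      omega
    rw [if_neg hneg, pvCombos_eq_nil _ _ hlen]
    rfl

-- ===== VERDICT (by name: the statement is the Claim_ definition above) =====
theorem Minutes_spec : Claim_equal_Minutes := by
  intro minutes _
  unfold Spec_Minutes
  by_cases h : 0 ≤ minutes ∧ minutes ≤ 6
  · have : minutes = 0 ∨ minutes = 1 ∨ minutes = 2 ∨ minutes = 3 ∨ minutes = 4 ∨
        minutes = 5 ∨ minutes = 6 := by omega
    rcases this with h | h | h | h | h | h | h <;> subst h <;> decide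
  · have h' : minutes < 0 ∨ 6 < minutes := by omega
    rw [pvA_out_of_range minutes h', pvB_out_of_range minutes h']
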